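-- pv_equiv track=rewrite | github.com/slytherin25/Advent_of_Code_2025_Python | src/day_2.py | containsRepeatV2
-- ===== SOURCE A (Python) =====
-- def containsRepeatV2(numberString: str) -> bool:
--     '''
--     Determines if a string contains repeats as defined by problem 2.
--
--     :param numberString: The string being analyzed.
--     :return: If the string contains repeats.
--     '''
--
--     if len(numberString) == 1:
--         return False
--
--     currentNumDivisions: int = 2
--     while currentNumDivisions <= len(numberString):
--         substringList: list[str] = []
--         stringLength: int = int(len(numberString) / currentNumDivisions)
--         totalLengthAdded: int = 0
--         while totalLengthAdded < len(numberString):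
--             substringList.append(numberString[totalLengthAdded:(totalLengthAdded + stringLength)])
--             totalLengthAdded = totalLengthAdded + stringLength
--
--         compareString: str = substringList[0]
--         allMatch: bool = True
--         for substring in substringList:
--             if substring != compareString:
--                 allMatch = False
--                 break
--
--         if allMatch:
--             return True
--
--         currentNumDivisions = currentNumDivisions + 1
--
--     return False
-- ===== SOURCE B (Python) =====
-- def containsRepeatV2(numberString: str) -> bool:
--     '''
--     Determines if a string contains repeats as defined by problem 2.
--
--     :param numberString: The string being analyzed.
--     :return: If the string contains repeats.
--     '''
--     n = len(numberString)
--     # s is a repetition of a block of length d (d | n, d < n) exactly when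
--     # the string equals itself shifted by d: s[d:] == s[:n-d].
--     return any(n % d == 0 and numberString[d:] == numberString[:n - d]
--                for d in range(1, n))
-- ===== Notes on version B (the rewrite author's own statement) =====
-- stated objective: faster
-- what changed: Instead of trying every division count 2..n and materialising the list of chunks each time, B tests candidate block lengths d=1..n-1 and, only when d divides n, checks the self-overlap equality s[d:] == s[:n-d]; no chunk lists are built and string comparison happens only at divisor lengths.
import Mathlib
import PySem

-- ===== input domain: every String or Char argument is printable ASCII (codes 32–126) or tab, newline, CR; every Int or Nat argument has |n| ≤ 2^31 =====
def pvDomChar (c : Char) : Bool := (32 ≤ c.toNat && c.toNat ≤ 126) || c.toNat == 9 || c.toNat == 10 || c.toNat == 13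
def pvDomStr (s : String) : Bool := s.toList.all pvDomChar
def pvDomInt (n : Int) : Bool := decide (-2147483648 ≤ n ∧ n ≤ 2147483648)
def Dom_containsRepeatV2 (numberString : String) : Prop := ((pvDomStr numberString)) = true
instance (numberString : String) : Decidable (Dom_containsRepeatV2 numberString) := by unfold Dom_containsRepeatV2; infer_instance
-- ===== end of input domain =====

-- B replaces A's try-every-division-count chunk-list scan by a divisor/self-overlap test (objective: faster).

-- ===== PORT A =====
-- inner while loop: appends numberString[totalLengthAdded : totalLengthAdded+stringLength];
-- the slice equals (cs.drop total).take L exactly for these natural bounds (PySem.List.slice_natCast_add).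
-- fuel (cs.length + 1) only makes the while loop total; it is never exhausted on the runs A performs.
def pvChunks (cs : List Char) (L : Nat) (total : Nat) (fuel : Nat) (acc : List (List Char)) : List (List Char) :=
  match fuel with
  | 0 => acc
  | f + 1 =>
    if total < cs.length then
      pvChunks cs L (total + L) f (acc ++ [(cs.drop total).take L])
    else acc

-- the for-loop over substringList with its break
def pvAllMatch (cmp : List Char) : List (List Char) → Bool
  | [] => true
  | c :: rest => if c ≠ cmp then false else pvAllMatch cmp rest

-- the outer while loop over currentNumDivisions; int(len/div) is exact floor division here (both positive)
def pvDivLoop (cs : List Char) (dv : Nat) : Bool :=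
  if _h : dv ≤ cs.length then
    let L := cs.length / dv
    let chunks := pvChunks cs L 0 (cs.length + 1) []
    if pvAllMatch (chunks.headD []) chunks then true
    else pvDivLoop cs (dv + 1)
  else false
termination_by cs.length + 1 - dv
decreasing_by omega

def containsRepeatV2 (numberString : String) : Bool :=
  let cs := numberString.toList
  if cs.length == 1 then false else pvDivLoop cs 2

-- ===== PORT B =====
-- any(n % d == 0 and s[d:] == s[:n-d] for d in range(1, n)); the slices are exact as drop/take for 0 ≤ d ≤ n
def containsRepeatV2_alt (numberString : String) : Bool :=
  let cs := numberString.toList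
  let n := cs.length
  (List.range' 1 (n - 1)).any (fun d => n % d == 0 && cs.drop d == cs.take (n - d))

-- ===== PRECONDITION & SPEC =====
def Spec_containsRepeatV2 (numberString : String) (out : Bool) : Prop := out = containsRepeatV2_alt numberString
instance (numberString : String) (out : Bool) : Decidable (Spec_containsRepeatV2 numberString out) := by unfold Spec_containsRepeatV2; infer_instance

-- ===== CLAIM (what is proved, stated in full; the proofs are below) =====
def Claim_equal_containsRepeatV2 : Prop := ∀ (numberString : String), Dom_containsRepeatV2 numberString → Spec_containsRepeatV2 numberString (containsRepeatV2 numberString)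

-- ===== LEMMAS AND PROOFS =====

-- the common characterization: cs is a whole number (≥ 2) of copies of its length-d prefix
def PvPow (cs : List Char) (d : Nat) : Prop :=
  1 ≤ d ∧ d < cs.length ∧ d ∣ cs.length ∧
    cs = List.flatten (List.replicate (cs.length / d) (cs.take d))

-- relative chunker (proof device for pvChunks)
def pvChunkF (L : Nat) : Nat → List Char → List (List Char)
  | 0, _ => []
  | f + 1, r => if r.isEmpty then [] else r.take L :: pvChunkF L f (r.drop L)

lemma pvMulSub (L m x : Nat) (h : x = L * m) (hm : 1 ≤ m) : x - L = L * (m - 1) := by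
  cases m with
  | zero => omega
  | succ m' => rw [h, Nat.mul_succ, Nat.add_sub_cancel]; simp

lemma pvChunks_acc (cs : List Char) (L : Nat) :
    ∀ f total acc, pvChunks cs L total f acc = acc ++ pvChunks cs L total f [] := by
  intro f
  induction f with
  | zero => intro total acc; simp [pvChunks]
  | succ f ih =>
    intro total acc
    simp only [pvChunks]
    by_cases h : total < cs.length
    · rw [if_pos h, if_pos h,
        ih (total + L) (acc ++ [(cs.drop total).take L]),
        ih (total + L) ([] ++ [(cs.drop total).take L])]
      simp
    · rw [if_neg h, if_neg h]
      simp

lemma pvChunks_eq_chunkF (cs : List Char) (L : Nat) :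
    ∀ f total, pvChunks cs L total f [] = pvChunkF L f (cs.drop total) := by
  intro f
  induction f with
  | zero => intro total; simp [pvChunks, pvChunkF]
  | succ f ih =>
    intro total
    simp only [pvChunks, pvChunkF]
    have hemp : (cs.drop total).isEmpty = decide (cs.length ≤ total) := by
      cases hb : (cs.drop total).isEmpty <;> simp_all [List.isEmpty_iff, List.drop_eq_nil_iff]
    by_cases h : total < cs.length
    · rw [if_pos h, pvChunks_acc, ih (total + L)]
      rw [if_neg (by rw [hemp]; simp; omega)]
      simp [List.drop_drop, Nat.add_comm]
    · rw [if_neg h, if_pos (by rw [hemp]; simp; omega)]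

lemma pvAllMatch_eq_all (t : List Char) (l : List (List Char)) :
    pvAllMatch t l = l.all (fun c => c == t) := by
  induction l with
  | nil => rfl
  | cons c rest ih =>
    simp only [pvAllMatch, List.all_cons]
    by_cases h : c = t
    · simp [h, ih]
    · simp [h]

-- all chunks equal the length-L block t  ⟺  r is copies of t
lemma pvAllC (t : List Char) (L : Nat) (hL : 1 ≤ L) (ht : t.length = L) :
    ∀ f r, r.length ≤ f →
      ((pvChunkF L f r).all (fun c => c == t) = true ↔
        (L ∣ r.length ∧ r = List.flatten (List.replicate (r.length / L) t))) := by
  intro f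
  induction f with
  | zero =>
    intro r hr
    have : r = [] := by cases r <;> simp_all
    subst this; simp [pvChunkF]
  | succ f ih =>
    intro r hr
    rcases eq_or_ne r [] with rfl | hne
    · simp [pvChunkF]
    · have hlen : 1 ≤ r.length := by cases r <;> simp_all
      have hemp : r.isEmpty = false := by simp [hne]
      simp only [pvChunkF, hemp, if_neg Bool.false_ne_true, List.all_cons, Bool.and_eq_true,
        beq_iff_eq]
      rw [ih (r.drop L) (by simp; omega)]
      have hdl : (r.drop L).length = r.length - L := by simp
      rw [hdl]
      by_cases hLr : L ≤ r.length
      · constructor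
        · rintro ⟨h1, h2, h3⟩
          have hdvd : L ∣ r.length := by
            have := Nat.dvd_add h2 (dvd_refl L)
            rwa [Nat.sub_add_cancel hLr] at this
          refine ⟨hdvd, ?_⟩
          obtain ⟨m, hm⟩ := hdvd
          have hm1 : 1 ≤ m := by nlinarith
          have hq : r.length / L = m := by rw [hm, Nat.mul_div_cancel_left _ (by omega)]
          have hq' : (r.length - L) / L = m - 1 := by
            rw [pvMulSub L m _ hm hm1, Nat.mul_div_cancel_left _ (by omega)]
          rw [hq' ] at h3
          have hrep : List.replicate m t = t :: List.replicate (m - 1) t := by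
            cases m with
            | zero => omega
            | succ m' => simp [List.replicate_succ]
          rw [hq, hrep, List.flatten_cons, ← h3, ← h1, List.take_append_drop]
        · rintro ⟨hdvd, heq⟩
          obtain ⟨m, hm⟩ := hdvd
          have hm1 : 1 ≤ m := by nlinarith
          have hq : r.length / L = m := by rw [hm, Nat.mul_div_cancel_left _ (by omega)]
          rw [hq] at heq
          have hrep : List.replicate m t = t :: List.replicate (m - 1) t := by
            cases m with
            | zero => omega
            | succ m' => simp [List.replicate_succ]
          rw [hrep, List.flatten_cons] at heq
          have htake : r.take L = t := by
            rw [heq, List.take_append_of_le_length (by omega), List.take_of_length_le (by omega)]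
          have hdrop : r.drop L = List.flatten (List.replicate (m - 1) t) := by
            rw [heq, List.drop_append_of_le_length (by omega), List.drop_of_length_le (by omega),
              List.nil_append]
          refine ⟨htake, ⟨m - 1, pvMulSub L m _ hm hm1⟩, ?_⟩
          rw [pvMulSub L m _ hm hm1, Nat.mul_div_cancel_left _ (by omega)]
          exact hdrop
      · -- r shorter than the block: the single chunk is r itself and cannot equal t
        constructor
        · rintro ⟨h1, -⟩
          exfalso
          have : (r.take L).length = r.length := by simp; omega
          rw [h1, ht] at this; omega
        · rintro ⟨hdvd, -⟩
          exfalso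
          have := Nat.le_of_dvd (by omega) hdvd
          omega

-- the overlap condition r = t ++ r.take (r.length - L)  ⟺  r is m copies of t (m ≥ 1)
lemma pvShiftPow (t : List Char) (L : Nat) (hL : 1 ≤ L) (ht : t.length = L) :
    ∀ m r, 1 ≤ m → r.length = L * m →
      (r = t ++ r.take (r.length - L) ↔ r = List.flatten (List.replicate m t)) := by
  intro m
  induction m with
  | zero => intro r h; omega
  | succ m ih =>
    intro r _ hr
    rcases Nat.eq_zero_or_pos m with rfl | hm
    · have h0 : r.length - L = 0 := by omega
      simp [h0, List.replicate_succ]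
    · have hn' : r.length - L = L * m := pvMulSub L (m + 1) _ hr (by omega)
      have htL : t.length ≤ r.length - L := by
        rw [ht, hn']; exact Nat.le_mul_of_pos_right L hm
      constructor
      · intro h
        set X := r.take (r.length - L) with hX
        have hXlen : X.length = L * m := by
          rw [hX, List.length_take, hn']
          exact Nat.min_eq_left (by rw [hr]; nlinarith)
        have h1 : X = (t ++ X).take (r.length - L) :=
          hX.trans (congrArg (List.take (r.length - L)) h)
        rw [List.take_append, List.take_of_length_le htL] at h1
        have harg : r.length - L - t.length = X.length - L := by
          rw [hn', ht, hXlen]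
        rw [harg] at h1
        have := (ih X hm hXlen).mp h1
        rw [h, this, List.replicate_succ, List.flatten_cons]
      · intro h
        have hrep : List.flatten (List.replicate (m + 1) t)
            = t ++ List.flatten (List.replicate m t) := by
          simp [List.replicate_succ]
        rw [hrep] at h
        set Y := List.flatten (List.replicate m t) with hY
        have hYlen : Y.length = L * m := by
          rw [hY, List.length_flatten]
          simp [ht, Nat.mul_comm]
        have hYshape : Y = t ++ Y.take (Y.length - L) := (ih Y hm hYlen).mpr rfl
        have hstep : r.take (r.length - L) = t ++ Y.take (Y.length - L) := by
          rw [hn']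
          conv_lhs => rw [h]
          rw [List.take_append,
            List.take_of_length_le (by rw [ht]; exact Nat.le_mul_of_pos_right L hm), ht, ← hYlen]
        rw [hstep, ← hYshape]
        exact h

-- B's per-d test ⟺ the power equation
lemma pvAlt_inner_iff (cs : List Char) (d : Nat) (h1 : 1 ≤ d) (h2 : d < cs.length)
    (hdvd : d ∣ cs.length) :
    (cs.drop d = cs.take (cs.length - d)) ↔
      cs = List.flatten (List.replicate (cs.length / d) (cs.take d)) := by
  obtain ⟨m, hm⟩ := hdvd
  have hm2 : 2 ≤ m := by nlinarith
  have hq : cs.length / d = m := by rw [hm, Nat.mul_div_cancel_left _ (by omega)]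
  set t := cs.take d with htdef
  have ht : t.length = d := by
    rw [htdef, List.length_take]; exact Nat.min_eq_left (by omega)
  set r := cs.drop d with hrdef
  have hrlen' : r.length = cs.length - d := by simp [hrdef]
  have hrlen : r.length = d * (m - 1) := by rw [hrlen', pvMulSub d m _ hm (by omega)]
  have hcs : cs = t ++ r := (List.take_append_drop d cs).symm
  have hidx : cs.length - d = d * (m - 1) := pvMulSub d m _ hm (by omega)
  have hstep : cs.take (cs.length - d) = t ++ r.take (r.length - d) := by
    rw [hidx]
    conv_lhs => rw [hcs]
    rw [List.take_append,
      List.take_of_length_le (by rw [ht]; exact Nat.le_mul_of_pos_right d (by omega)), ht, hrlen]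
  rw [hstep]
  have hiff := pvShiftPow t d h1 ht (m - 1) r (by omega) hrlen
  have hrep : List.replicate m t = t :: List.replicate (m - 1) t := by
    cases m with
    | zero => omega
    | succ m' => simp [List.replicate_succ]
  constructor
  · intro h
    have hr2 := hiff.mp h
    rw [hq, hrep, List.flatten_cons]
    conv_lhs => rw [hcs]
    rw [hr2]
  · intro h
    rw [hq, hrep, List.flatten_cons] at h
    rw [hcs] at h
    exact hiff.mpr (List.append_cancel_left h)

-- A's inner body at division count k ⟺ the power equation at block length n / k
lemma pvInner_iff (cs : List Char) (k : Nat) (hk2 : 2 ≤ k) (hkn : k ≤ cs.length) :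
    (pvAllMatch ((pvChunks cs (cs.length / k) 0 (cs.length + 1) []).headD [])
      (pvChunks cs (cs.length / k) 0 (cs.length + 1) []) = true) ↔ PvPow cs (cs.length / k) := by
  set L := cs.length / k with hLdef
  have hn2 : 2 ≤ cs.length := le_trans hk2 hkn
  have hL1 : 1 ≤ L := (Nat.one_le_div_iff (by omega)).mpr hkn
  have hLlt : L < cs.length := by
    have h1 : L ≤ cs.length / 2 := Nat.div_le_div_left hk2 (by omega)
    have h2 : cs.length / 2 < cs.length := Nat.div_lt_self (by omega) (by omega)
    omega
  have hchunk : pvChunks cs L 0 (cs.length + 1) [] = pvChunkF L (cs.length + 1) cs := by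
    rw [pvChunks_eq_chunkF]; simp
  have hne : cs ≠ [] := by intro h; rw [h] at hn2; simp at hn2
  have hemp : cs.isEmpty = false := by simp [hne]
  have hhead : (pvChunkF L (cs.length + 1) cs).headD [] = cs.take L := by
    simp [pvChunkF, hemp]
  have htlen : (cs.take L).length = L := by
    rw [List.length_take]; exact Nat.min_eq_left (by omega)
  rw [hchunk, hhead, pvAllMatch_eq_all,
    pvAllC (cs.take L) L hL1 htlen (cs.length + 1) cs (by omega)]
  unfold PvPow
  constructor
  · rintro ⟨hdvd, heq⟩
    exact ⟨hL1, hLlt, hdvd, heq⟩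
  · rintro ⟨-, -, hdvd, heq⟩
    exact ⟨hdvd, heq⟩

-- the outer while loop: true iff some admissible division count succeeds
lemma pvDivLoop_iff (cs : List Char) :
    ∀ t dv, cs.length + 1 - dv ≤ t →
      (pvDivLoop cs dv = true ↔ ∃ k, dv ≤ k ∧ k ≤ cs.length ∧
        pvAllMatch ((pvChunks cs (cs.length / k) 0 (cs.length + 1) []).headD [])
          (pvChunks cs (cs.length / k) 0 (cs.length + 1) []) = true) := by
  intro t
  induction t with
  | zero =>
    intro dv hdv
    rw [pvDivLoop, dif_neg (by omega)]
    simp only [Bool.false_eq_true, false_iff]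
    rintro ⟨k, hk1, hk2, -⟩; omega
  | succ t ih =>
    intro dv hdv
    by_cases h : dv ≤ cs.length
    · rw [pvDivLoop, dif_pos h]
      simp only
      by_cases hm : pvAllMatch ((pvChunks cs (cs.length / dv) 0 (cs.length + 1) []).headD [])
          (pvChunks cs (cs.length / dv) 0 (cs.length + 1) []) = true
      · rw [if_pos hm]
        simp only [true_iff]
        exact ⟨dv, le_refl dv, h, hm⟩
      · rw [if_neg hm, ih (dv + 1) (by omega)]
        constructor
        · rintro ⟨k, hk1, hk2, hk3⟩
          exact ⟨k, by omega, hk2, hk3⟩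
        · rintro ⟨k, hk1, hk2, hk3⟩
          refine ⟨k, ?_, hk2, hk3⟩
          rcases Nat.eq_or_lt_of_le hk1 with rfl | h'
          · exact absurd hk3 hm
          · omega
    · rw [pvDivLoop, dif_neg h]
      simp only [Bool.false_eq_true, false_iff]
      rintro ⟨k, hk1, hk2, -⟩; omega

-- A = true ⟺ some block length works
lemma pvA_iff (cs : List Char) (hn : 2 ≤ cs.length) :
    (pvDivLoop cs 2 = true ↔ ∃ d, PvPow cs d) := by
  rw [pvDivLoop_iff cs (cs.length + 1 - 2) 2 (le_refl _)]
  constructor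
  · rintro ⟨k, hk1, hk2, hk3⟩
    exact ⟨cs.length / k, (pvInner_iff cs k hk1 hk2).mp hk3⟩
  · rintro ⟨d, hp⟩
    obtain ⟨hd1, hd2, hdvd, heq⟩ := hp
    have hk1 : 2 ≤ cs.length / d := by
      obtain ⟨m, hm⟩ := hdvd
      have : 2 ≤ m := by nlinarith
      rw [hm, Nat.mul_div_cancel_left _ (by omega)]
      exact this
    refine ⟨cs.length / d, hk1, Nat.div_le_self _ _, ?_⟩
    rw [pvInner_iff cs _ hk1 (Nat.div_le_self _ _)]
    have hdd : cs.length / (cs.length / d) = d := Nat.div_div_self hdvd (by omega)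
    rw [hdd]
    exact ⟨hd1, hd2, hdvd, heq⟩

-- B = true ⟺ some block length works
lemma pvB_iff (cs : List Char) :
    ((List.range' 1 (cs.length - 1)).any
        (fun d => cs.length % d == 0 && cs.drop d == cs.take (cs.length - d)) = true ↔
      ∃ d, PvPow cs d) := by
  rw [List.any_eq_true]
  constructor
  · rintro ⟨d, hmem, hd⟩
    rw [List.mem_range'_1] at hmem
    obtain ⟨hd1, hd2⟩ := hmem
    have hdlt : d < cs.length := by omega
    simp only [Bool.and_eq_true, beq_iff_eq] at hd
    obtain ⟨hmod, heq⟩ := hd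
    have hdvd : d ∣ cs.length := Nat.dvd_of_mod_eq_zero hmod
    exact ⟨d, hd1, hdlt, hdvd, (pvAlt_inner_iff cs d hd1 hdlt hdvd).mp heq⟩
  · rintro ⟨d, hd1, hd2, hdvd, heq⟩
    refine ⟨d, by rw [List.mem_range'_1]; omega, ?_⟩
    simp only [Bool.and_eq_true, beq_iff_eq]
    refine ⟨?_, (pvAlt_inner_iff cs d hd1 hd2 hdvd).mpr heq⟩
    obtain ⟨c, hc⟩ := hdvd
    rw [hc]
    exact Nat.mul_mod_right d c

-- ===== VERDICT (by name: the statement is the Claim_ definition above) =====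
theorem containsRepeatV2_spec : Claim_equal_containsRepeatV2 := by
  intro s _
  unfold Spec_containsRepeatV2 containsRepeatV2 containsRepeatV2_alt
  simp only
  set cs := s.toList with hcs
  by_cases h2 : 2 ≤ cs.length
  · have hg : (cs.length == 1) = false := by simp; omega
    rw [hg, if_neg Bool.false_ne_true]
    have ha := pvA_iff cs h2
    have hb := pvB_iff cs
    cases hA : pvDivLoop cs 2 <;> cases hB : (List.range' 1 (cs.length - 1)).any
        (fun d => cs.length % d == 0 && cs.drop d == cs.take (cs.length - d))
    · rfl
    · exact absurd (ha.mpr (hb.mp hB)) (by simp [hA])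
    · exact absurd (hb.mpr (ha.mp hA)) (by simp [hB])
    · rfl
  · have hr : cs.length - 1 = 0 := by omega
    rw [hr]
    rcases (show cs.length = 0 ∨ cs.length = 1 by omega) with h0 | h1
    · have hg : (cs.length == 1) = false := by simp [h0]
      rw [hg, if_neg Bool.false_ne_true, pvDivLoop, dif_neg (by omega)]
      simp
    · have hg : (cs.length == 1) = true := by simp [h1]
      rw [hg, if_pos rfl]
      simp
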